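-- pv_equiv track=rewrite | github.com/staurus86/seo-tools-platform | app/tools/clusterizer/input_parser.py | _detect_column_mapping
-- ===== SOURCE A (Python) =====
-- from typing import Any, Dict, List, Optional
--
-- _KW_HEADER_ALIASES = {
--     "keyword", "keywords", "query", "queries", "search term", "search terms",
--     "phrase", "phrases", "ключевое слово", "ключевые слова", "ключ", "фраза",
-- }
--
-- _FREQ_HEADER_ALIASES = {
--     "volume", "search volume", "frequency", "freq", "показов", "частота",
--     "impressions", "avg. monthly searches", "avg monthly searches", "msv",
-- }
--
-- def _detect_column_mapping(headers: List[str]) -> Dict[str, int]: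
--     """Return {"keyword": col_idx, "frequency": col_idx} based on header names.
--     Falls back to first text col / first numeric col if headers are absent/unrecognised.
--     """
--     kw_idx: Optional[int] = None
--     freq_idx: Optional[int] = None
--     for i, raw in enumerate(headers):
--         h = str(raw or "").strip().lower()
--         if kw_idx is None and h in _KW_HEADER_ALIASES:
--             kw_idx = i
--         if freq_idx is None and h in _FREQ_HEADER_ALIASES:
--             freq_idx = i
--     # Fallback: keyword = first col, frequency = second col (if exists)
--     if kw_idx is None:
--         kw_idx = 0
--     if freq_idx is None and len(headers) >= 2:
--         freq_idx = 1
--     return {"keyword": kw_idx, "frequency": freq_idx}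
-- ===== SOURCE B (Python) =====
-- _KW_HEADER_ALIASES = {
--     "keyword", "keywords", "query", "queries", "search term", "search terms",
--     "phrase", "phrases", "ключевое слово", "ключевые слова", "ключ", "фраза",
-- }
--
-- _FREQ_HEADER_ALIASES = {
--     "volume", "search volume", "frequency", "freq", "показов", "частота",
--     "impressions", "avg. monthly searches", "avg monthly searches", "msv",
-- }
--
-- def _detect_column_mapping(headers):
--     # Index table: each normalized header -> its first column index.
--     table = {}
--     for i, raw in enumerate(headers):
--         table.setdefault(str(raw or "").strip().lower(), i)
--     kw_matches = [idx for h, idx in table.items() if h in _KW_HEADER_ALIASES]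
--     freq_matches = [idx for h, idx in table.items() if h in _FREQ_HEADER_ALIASES]
--     kw_idx = min(kw_matches) if kw_matches else None
--     freq_idx = min(freq_matches) if freq_matches else None
--     if kw_idx is None:
--         kw_idx = 0
--     if freq_idx is None and len(headers) >= 2:
--         freq_idx = 1
--     return {"keyword": kw_idx, "frequency": freq_idx}
-- ===== Notes on version B (the rewrite author's own statement) =====
-- stated objective: alternative
-- what changed: Replaced the single first-match scan over headers by building a first-occurrence header->index dict with setdefault and taking the minimum index over alias-matching entries, with the same fallbacks.
import Mathlib
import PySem

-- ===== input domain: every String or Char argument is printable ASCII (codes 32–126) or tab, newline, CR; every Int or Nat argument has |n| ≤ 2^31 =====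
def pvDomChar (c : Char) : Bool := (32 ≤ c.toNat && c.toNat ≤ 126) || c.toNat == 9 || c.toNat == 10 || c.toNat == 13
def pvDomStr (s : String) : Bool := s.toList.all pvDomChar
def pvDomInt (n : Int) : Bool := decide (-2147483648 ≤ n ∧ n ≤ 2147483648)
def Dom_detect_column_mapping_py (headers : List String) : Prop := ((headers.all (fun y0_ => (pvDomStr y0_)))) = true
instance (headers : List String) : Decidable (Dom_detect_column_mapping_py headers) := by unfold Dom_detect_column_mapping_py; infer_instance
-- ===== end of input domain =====

-- B builds a first-occurrence header->index table and takes the min index over alias matches,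
-- instead of A's single first-match scan; alternative structure, same results.


-- ===== PORT A =====
def pvAliasesKW : List String :=
  ["keyword", "keywords", "query", "queries", "search term", "search terms",
   "phrase", "phrases", "ключевое слово", "ключевые слова", "ключ", "фраза"]

def pvAliasesFreq : List String :=
  ["volume", "search volume", "frequency", "freq", "показов", "частота",
   "impressions", "avg. monthly searches", "avg monthly searches", "msv"]

-- h = str(raw or "").strip().lower()
def pvNorm (raw : String) : String :=
  PySem.Str.lower (PySem.Str.strip (if raw = "" then "" else raw))

-- the for-loop of A: first matching index for each alias set
def pvALoop : List String → Int → Option Int → Option Int → Option Int × Option Int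
  | [], _, kw, fr => (kw, fr)
  | raw :: t, i, kw, fr =>
    let h := pvNorm raw
    let kw' := if kw = none ∧ h ∈ pvAliasesKW then some i else kw
    let fr' := if fr = none ∧ h ∈ pvAliasesFreq then some i else fr
    pvALoop t (i + 1) kw' fr'

def detect_column_mapping_py (headers : List String) : List (String × Option Int) :=
  let st := pvALoop headers 0 none none
  let kw : Int := match st.1 with | none => 0 | some k => k
  let fr : Option Int := if st.2 = none ∧ 2 ≤ headers.length then some 1 else st.2
  [("keyword", some kw), ("frequency", fr)]

-- ===== PORT B =====
-- table.setdefault(norm(raw), i) over enumerate(headers)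
def pvBLoop : List String → Int → PySem.Dict String Int → PySem.Dict String Int
  | [], _, d => d
  | raw :: t, i, d => pvBLoop t (i + 1) (d.setdefault (pvNorm raw) i)

def detect_column_mapping_py_alt (headers : List String) : List (String × Option Int) :=
  let table := pvBLoop headers 0 PySem.Dict.empty
  let kwM := (table.items.filter (fun kv => decide (kv.1 ∈ pvAliasesKW))).map Prod.snd
  let frM := (table.items.filter (fun kv => decide (kv.1 ∈ pvAliasesFreq))).map Prod.snd
  let kw0 := PySem.List.min? kwM (fun x => x)   -- min(kw_matches) if kw_matches else None
  let fr0 := PySem.List.min? frM (fun x => x)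
  let kw : Int := match kw0 with | none => 0 | some k => k
  let fr : Option Int := if fr0 = none ∧ 2 ≤ headers.length then some 1 else fr0
  [("keyword", some kw), ("frequency", fr)]

-- ===== PRECONDITION & SPEC =====
def Spec_detect_column_mapping_py (headers : List String) (out : List (String × Option Int)) : Prop := out = detect_column_mapping_py_alt headers
instance (headers : List String) (out : List (String × Option Int)) : Decidable (Spec_detect_column_mapping_py headers out) := by unfold Spec_detect_column_mapping_py; infer_instance

-- ===== CLAIM (what is proved, stated in full; the proofs are below) =====
def Claim_equal_detect_column_mapping_py : Prop := ∀ (headers : List String), Dom_detect_column_mapping_py headers → Spec_detect_column_mapping_py headers (detect_column_mapping_py headers)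

-- ===== LEMMAS AND PROOFS =====

-- first index i at which P (pvNorm header) holds (the value A's scan keeps)
def pvFFirst (P : String → Prop) [DecidablePred P] : List String → Int → Option Int
  | [], _ => none
  | raw :: t, i => if P (pvNorm raw) then some i else pvFFirst P t (i + 1)

-- the same first match, but skipping normalized headers already seen
def pvGFirst (P : String → Prop) [DecidablePred P] : List String → Int → List String → Option Int
  | [], _, _ => none
  | raw :: t, i, seen =>
    let h := pvNorm raw
    if h ∈ seen then pvGFirst P t (i + 1) seen
    else if P h then some i else pvGFirst P t (i + 1) (h :: seen)

def pvOFirst : Option Int → Option Int → Option Int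
  | none, b => b
  | some x, _ => some x

def pvOMin : Option Int → Option Int → Option Int
  | none, b => b
  | some x, none => some x
  | some x, some y => some (min x y)

-- the min-over-matching-entries B computes from the table
def pvDMin (P : String → Prop) [DecidablePred P] (d : PySem.Dict String Int) : Option Int :=
  PySem.List.min? ((d.items.filter (fun kv => decide (P kv.1))).map Prod.snd) (fun x => x)

theorem pvALoop_eq (t : List String) : ∀ (i : Int) (kw fr : Option Int),
    pvALoop t i kw fr =
      (pvOFirst kw (pvFFirst (· ∈ pvAliasesKW) t i),
       pvOFirst fr (pvFFirst (· ∈ pvAliasesFreq) t i)) := by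
  induction t with
  | nil => intro i kw fr; cases kw <;> cases fr <;> simp [pvALoop, pvFFirst, pvOFirst]
  | cons raw t ih =>
    intro i kw fr
    simp only [pvALoop, pvFFirst, ih]
    cases kw <;> cases fr <;>
      by_cases hk : pvNorm raw ∈ pvAliasesKW <;>
      by_cases hf : pvNorm raw ∈ pvAliasesFreq <;>
      simp [pvOFirst, hk, hf]

theorem pvOMin_assoc (a b c : Option Int) : pvOMin (pvOMin a b) c = pvOMin a (pvOMin b c) := by
  cases a <;> cases b <;> cases c <;> simp [pvOMin, min_assoc]

theorem pvMin?_append_singleton (l : List Int) (v : Int) :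
    PySem.List.min? (l ++ [v]) (fun x => x) = pvOMin (PySem.List.min? l (fun x => x)) (some v) := by
  cases l with
  | nil => simp [PySem.List.min?, pvOMin]
  | cons x t =>
    rw [List.cons_append, PySem.List.min?_id_cons, PySem.List.min?_id_cons]
    simp [pvOMin, List.foldl_append]

theorem pvGFirst_lb (P : String → Prop) [DecidablePred P] (t : List String) :
    ∀ (i : Int) (seen : List String) (j : Int), pvGFirst P t i seen = some j → i ≤ j := by
  induction t with
  | nil => intro i seen j h; simp [pvGFirst] at h
  | cons raw t ih =>
    intro i seen j h
    simp only [pvGFirst] at h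
    split_ifs at h with h1 h2
    · exact le_trans (by omega) (ih (i+1) seen j h)
    · cases h; omega
    · exact le_trans (by omega) (ih (i+1) _ j h)

theorem pvGFirst_congr (P : String → Prop) [DecidablePred P] (t : List String) :
    ∀ (i : Int) (s s' : List String), (∀ x, x ∈ s ↔ x ∈ s') →
    pvGFirst P t i s = pvGFirst P t i s' := by
  induction t with
  | nil => intro i s s' _; simp [pvGFirst]
  | cons raw t ih =>
    intro i s s' hss
    simp only [pvGFirst]
    by_cases hm : pvNorm raw ∈ s
    · rw [if_pos hm, if_pos ((hss _).mp hm)]; exact ih _ s s' hss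
    · rw [if_neg hm, if_neg (fun h => hm ((hss _).mpr h))]
      split_ifs with hp
      · rfl
      · exact ih _ _ _ (by intro x; simp [hss x])

theorem pvBLoop_min (P : String → Prop) [DecidablePred P] (t : List String) :
    ∀ (i : Int) (d : PySem.Dict String Int), d.keys.Nodup →
    pvDMin P (pvBLoop t i d) = pvOMin (pvDMin P d) (pvGFirst P t i d.keys) := by
  induction t with
  | nil =>
    intro i d _
    cases hv : pvDMin P d <;> simp [pvBLoop, pvGFirst, pvOMin, hv]
  | cons raw t ih =>
    intro i d hnd
    simp only [pvBLoop, pvGFirst]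
    by_cases hm : pvNorm raw ∈ d.keys
    · have hc : d.contains (pvNorm raw) = true := by
        rw [PySem.Dict.contains_iff_mem_keys]; exact hm
      rw [PySem.Dict.setdefault_of_contains d i hc, if_pos hm]
      exact ih _ d hnd
    · have hc : d.contains (pvNorm raw) = false := by
        rw [Bool.eq_false_iff]
        intro h; exact hm ((PySem.Dict.contains_iff_mem_keys d _).mp h)
      rw [PySem.Dict.setdefault_of_not_contains d i hc, if_neg hm]
      have hkeys : (d.insert (pvNorm raw) i).keys = d.keys ++ [pvNorm raw] :=
        PySem.Dict.keys_insert_of_not_contains d i hc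
      have hnd' : (d.insert (pvNorm raw) i).keys.Nodup := by
        rw [hkeys]; simp only [List.nodup_append, List.nodup_singleton, true_and]
        exact ⟨hnd, by intro a ha b hb; simp only [List.mem_singleton] at hb; subst hb; exact fun h => hm (h ▸ ha)⟩
      have hitems : (d.insert (pvNorm raw) i).items = d.items ++ [(pvNorm raw, i)] :=
        PySem.Dict.items_insert_of_not_contains d i hc
      have hdm : pvDMin P (d.insert (pvNorm raw) i) =
          if P (pvNorm raw) then pvOMin (pvDMin P d) (some i) else pvDMin P d := by
        unfold pvDMin
        rw [hitems, List.filter_append, List.map_append]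
        split_ifs with hp
        · simp only [List.filter, hp, decide_true, List.map]
          simpa using pvMin?_append_singleton _ i
        · simp [List.filter, hp]
      rw [ih _ _ hnd', hdm, hkeys]
      have hcongr : pvGFirst P t (i+1) (d.keys ++ [pvNorm raw]) =
          pvGFirst P t (i+1) (pvNorm raw :: d.keys) :=
        pvGFirst_congr P t _ _ _ (by intro x; simp [or_comm])
      rw [hcongr]
      split_ifs with hp
      · -- goal: pvOMin (pvOMin (pvDMin P d) (some i)) (pvGFirst ...) = pvOMin (pvDMin P d) (some i)
        rw [pvOMin_assoc]
        congr 1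
        cases hg : pvGFirst P t (i+1) (pvNorm raw :: d.keys) with
        | none => rfl
        | some j =>
          have := pvGFirst_lb P t (i+1) _ j hg
          simp [pvOMin, min_eq_left (by omega : i ≤ j)]
      · rfl

theorem pvGFirst_eq_fFirst (P : String → Prop) [DecidablePred P] (t : List String) :
    ∀ (i : Int) (seen : List String), (∀ x ∈ seen, ¬ P x) →
    pvGFirst P t i seen = pvFFirst P t i := by
  induction t with
  | nil => intro i seen _; simp [pvGFirst, pvFFirst]
  | cons raw t ih =>
    intro i seen hs
    simp only [pvGFirst, pvFFirst]
    by_cases hm : pvNorm raw ∈ seen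
    · rw [if_pos hm, if_neg (hs _ hm)]; exact ih _ _ hs
    · rw [if_neg hm]
      split_ifs with hp
      · rfl
      · exact ih _ _ (by intro x hx; rcases List.mem_cons.mp hx with rfl | hx; exact hp; exact hs x hx)

theorem pvB_min_eq (P : String → Prop) [DecidablePred P] (headers : List String) :
    pvDMin P (pvBLoop headers 0 PySem.Dict.empty) = pvFFirst P headers 0 := by
  rw [pvBLoop_min P headers 0 PySem.Dict.empty (by simp [show (PySem.Dict.empty : PySem.Dict String Int).keys = [] from rfl])]
  have h1 : pvDMin P (PySem.Dict.empty : PySem.Dict String Int) = none := rfl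
  have h2 : (PySem.Dict.empty : PySem.Dict String Int).keys = [] := rfl
  rw [h1, h2, pvGFirst_eq_fFirst P headers 0 [] (by simp)]
  cases pvFFirst P headers 0 <;> rfl


-- ===== VERDICT (by name: the statement is the Claim_ definition above) =====
theorem detect_column_mapping_py_spec : Claim_equal_detect_column_mapping_py := by
  intro headers _
  have hk := pvB_min_eq (· ∈ pvAliasesKW) headers
  have hf := pvB_min_eq (· ∈ pvAliasesFreq) headers
  unfold pvDMin at hk hf
  unfold Spec_detect_column_mapping_py detect_column_mapping_py detect_column_mapping_py_alt
  simp only [pvALoop_eq, pvOFirst, hk, hf]
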